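-- pv_equiv track=rewrite | github.com/KacperWyrwal/flow-matching-on-graphs | experiments/ex13b_posterior_sampling.py | build_octant_regions
-- ===== SOURCE A (Python) =====
-- def build_octant_regions(size=5):
--     """8 octants of the size^3 cube, indexed by (x<mid, y<mid, z<mid)."""
--     mid = size / 2.0
--     regions = {}
--     for xi, xlab in [(True, 'front'), (False, 'back')]:
--         for yi, ylab in [(True, 'left'), (False, 'right')]:
--             for zi, zlab in [(True, 'bottom'), (False, 'top')]:
--                 name = f'{xlab}_{ylab}_{zlab}'
--                 nodes = []
--                 for n in range(size ** 3):
--                     x = n // (size * size)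
--                     y = (n // size) % size
--                     z = n % size
--                     if (x < mid) == xi and (y < mid) == yi and (z < mid) == zi:
--                         nodes.append(n)
--                 regions[name] = nodes
--     return regions
-- ===== SOURCE B (Python) =====
-- def build_octant_regions(size=5):
--     """8 octants of the size^3 cube, indexed by (x<mid, y<mid, z<mid)."""
--     mid = size / 2.0
--     regions = {x + '_' + y + '_' + z: []
--                for x in ('front', 'back')
--                for y in ('left', 'right')
--                for z in ('bottom', 'top')}
--     for n in range(size ** 3):
--         x = n // (size * size)
--         y = (n // size) % size
--         z = n % size
--         name = ('front' if x < mid else 'back') + '_' \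
--              + ('left' if y < mid else 'right') + '_' \
--              + ('bottom' if z < mid else 'top')
--         regions[name].append(n)
--     return regions
-- ===== Notes on version B (the rewrite author's own statement) =====
-- stated objective: faster
-- what changed: A scans all size^3 nodes once per octant (8 passes, each re-deriving coordinates and testing the full 3-way condition); B pre-creates the 8 regions in the same label order and makes a single pass over the nodes, decoding each node's coordinates once and routing it directly to its region by building its name.
import Mathlib
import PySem

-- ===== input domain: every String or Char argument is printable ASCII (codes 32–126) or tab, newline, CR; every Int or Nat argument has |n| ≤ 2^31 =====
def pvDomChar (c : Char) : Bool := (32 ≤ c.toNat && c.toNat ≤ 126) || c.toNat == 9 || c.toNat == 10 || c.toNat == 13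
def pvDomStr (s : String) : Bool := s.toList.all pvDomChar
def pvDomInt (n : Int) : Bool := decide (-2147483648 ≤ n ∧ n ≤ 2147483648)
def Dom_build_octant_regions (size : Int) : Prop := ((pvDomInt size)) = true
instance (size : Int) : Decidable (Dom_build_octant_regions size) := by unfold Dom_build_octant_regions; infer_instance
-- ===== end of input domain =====

-- B replaces A's eight full scans of the size^3 nodes by one pass that routes each node to its
-- pre-created region (objective: faster, constant factor).


-- ===== PORT A =====
-- 'mid = size / 2.0' and 'x < mid': x and size are integers with |size| ≤ 2^31, so size/2.0 is an
-- exact double and 'x < mid' is exactly the integer comparison '2*x < size'; ported as that.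
def build_octant_regions (size : Int) : List (String × List Int) :=
  (([(true, "front"), (false, "back")] : List (Bool × String)).foldl (fun regions xp =>
    ([(true, "left"), (false, "right")] : List (Bool × String)).foldl (fun regions yp =>
      ([(true, "bottom"), (false, "top")] : List (Bool × String)).foldl (fun regions zp =>
        let name := xp.2 ++ "_" ++ yp.2 ++ "_" ++ zp.2
        let nodes := (PySem.List.pyRange 0 (size ^ 3) 1).foldl (fun nodes n =>
          let x := PySem.Int.floordiv n (size * size)
          let y := PySem.Int.mod (PySem.Int.floordiv n size) size
          let z := PySem.Int.mod n size
          if (decide (2 * x < size) == xp.1) && (decide (2 * y < size) == yp.1)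
              && (decide (2 * z < size) == zp.1) then nodes ++ [n] else nodes) []
        regions.insert name nodes) regions) regions)
    (PySem.Dict.empty : PySem.Dict String (List Int))).items

-- ===== PORT B =====
-- 'regions[name].append(n)': name is always one of the pre-created keys, ported as modify with default [].
def build_octant_regions_alt (size : Int) : List (String × List Int) :=
  let init : PySem.Dict String (List Int) := PySem.Dict.ofList
    ((["front", "back"] : List String).flatMap (fun x =>
      (["left", "right"] : List String).flatMap (fun y =>
        (["bottom", "top"] : List String).map (fun z => (x ++ "_" ++ y ++ "_" ++ z, ([] : List Int))))))
  ((PySem.List.pyRange 0 (size ^ 3) 1).foldl (fun regions n =>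
    let x := PySem.Int.floordiv n (size * size)
    let y := PySem.Int.mod (PySem.Int.floordiv n size) size
    let z := PySem.Int.mod n size
    let name := (if 2 * x < size then "front" else "back") ++ "_"
              ++ (if 2 * y < size then "left" else "right") ++ "_"
              ++ (if 2 * z < size then "bottom" else "top")
    regions.modify name [] (fun v => v ++ [n])) init).items

-- ===== PRECONDITION & SPEC =====
def Spec_build_octant_regions (size : Int) (out : List (String × List Int)) : Prop := out = build_octant_regions_alt size
instance (size : Int) (out : List (String × List Int)) : Decidable (Spec_build_octant_regions size out) := by unfold Spec_build_octant_regions; infer_instance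

-- ===== CLAIM (what is proved, stated in full; the proofs are below) =====
def Claim_equal_build_octant_regions : Prop := ∀ (size : Int), Dom_build_octant_regions size → Spec_build_octant_regions size (build_octant_regions size)

-- ===== LEMMAS AND PROOFS =====

-- the name B assigns to node n
def pvKey (size n : Int) : String :=
  (if 2 * PySem.Int.floordiv n (size * size) < size then "front" else "back") ++ "_"
    ++ (if 2 * PySem.Int.mod (PySem.Int.floordiv n size) size < size then "left" else "right") ++ "_"
    ++ (if 2 * PySem.Int.mod n size < size then "bottom" else "top")

-- the per-octant node list A builds
def pvNodesA (size : Int) (xi yi zi : Bool) : List Int :=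
  (PySem.List.pyRange 0 (size ^ 3) 1).foldl (fun nodes n =>
    if (decide (2 * PySem.Int.floordiv n (size * size) < size) == xi)
        && (decide (2 * PySem.Int.mod (PySem.Int.floordiv n size) size < size) == yi)
        && (decide (2 * PySem.Int.mod n size < size) == zi) then nodes ++ [n] else nodes) []

def pvInit : PySem.Dict String (List Int) := PySem.Dict.ofList
  ((["front", "back"] : List String).flatMap (fun x =>
    (["left", "right"] : List String).flatMap (fun y =>
      (["bottom", "top"] : List String).map (fun z => (x ++ "_" ++ y ++ "_" ++ z, ([] : List Int))))))

theorem pvKey_mem (size n : Int) :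
    pvKey size n ∈ (["front_left_bottom", "front_left_top", "front_right_bottom", "front_right_top",
      "back_left_bottom", "back_left_top", "back_right_bottom", "back_right_top"] : List String) := by
  unfold pvKey
  split_ifs <;> simp

theorem pvItems_foldl_modify (key : Int → String) (l : List Int) (d : PySem.Dict String (List Int))
    (hnd : d.keys.Nodup) (hmem : ∀ n ∈ l, d.contains (key n) = true) :
    (l.foldl (fun d n => d.modify (key n) [] (fun v => v ++ [n])) d).items
      = d.items.map (fun p => (p.1, p.2 ++ l.filter (fun n => key n == p.1))) := by
  induction l generalizing d with
  | nil => simp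
  | cons a t ih =>
    have hca : d.contains (key a) = true := hmem a (by simp)
    have hstep : (d.modify (key a) [] (fun v => v ++ [a])).items
        = d.items.map (fun p => if p.1 == key a then (key a, p.2 ++ [a]) else p) := by
      rw [PySem.Dict.modify, PySem.Dict.items_insert_of_contains _ _ hca]
      apply List.map_congr_left
      intro p hp
      by_cases h : (p.1 == key a) = true
      · have h' : p.1 = key a := by simpa using h
        have hp' : (key a, p.2) ∈ d.items := by rw [← h']; exact hp
        have hg : d.getD (key a) [] = p.2 := PySem.Dict.getD_of_mem_items d hp' hnd []
        rw [if_pos h, if_pos h, hg]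
      · rw [if_neg h, if_neg h]
    have hkeys : (d.modify (key a) [] (fun v => v ++ [a])).keys = d.keys := by
      rw [PySem.Dict.modify, PySem.Dict.keys_insert_of_contains _ _ hca]
    have hnd' : (d.modify (key a) [] (fun v => v ++ [a])).keys.Nodup := by rw [hkeys]; exact hnd
    have hcont : ∀ n ∈ t, (d.modify (key a) [] (fun v => v ++ [a])).contains (key n) = true := by
      intro n hn
      rw [PySem.Dict.contains_iff_mem_keys, hkeys, ← PySem.Dict.contains_iff_mem_keys]
      exact hmem n (by simp [hn])
    rw [List.foldl_cons, ih _ hnd' hcont, hstep, List.map_map]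
    apply List.map_congr_left
    intro p _
    by_cases h : (p.1 == key a) = true
    · have h' : p.1 = key a := by simpa using h
      show (fun p => (p.1, p.2 ++ List.filter (fun n => key n == p.1) t))
          (if (p.1 == key a) = true then (key a, p.2 ++ [a]) else p)
        = (p.1, p.2 ++ List.filter (fun n => key n == p.1) (a :: t))
      rw [if_pos h, h']
      simp only [List.filter_cons]
      rw [if_pos (show ((key a == key a) = true) by simp), List.append_assoc,
        List.singleton_append]
    · have h'' : (key a == p.1) = false := by
        rcases hb : key a == p.1
        · rfl
        · exfalso
          apply h
          have he : key a = p.1 := by simpa using hb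
          rw [he]
          exact beq_self_eq_true p.1
      show (fun p => (p.1, p.2 ++ List.filter (fun n => key n == p.1) t))
          (if (p.1 == key a) = true then (key a, p.2 ++ [a]) else p)
        = (p.1, p.2 ++ List.filter (fun n => key n == p.1) (a :: t))
      rw [if_neg h]
      simp only [List.filter_cons]
      rw [if_neg (show ¬((key a == p.1) = true) by simp [h''])]

theorem pvKey_eq_cond (size n : Int) (xi yi zi : Bool) :
    (pvKey size n == ((if xi then "front" else "back") ++ "_" ++ (if yi then "left" else "right")
        ++ "_" ++ (if zi then "bottom" else "top")))
      = ((decide (2 * PySem.Int.floordiv n (size * size) < size) == xi)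
          && (decide (2 * PySem.Int.mod (PySem.Int.floordiv n size) size < size) == yi)
          && (decide (2 * PySem.Int.mod n size < size) == zi)) := by
  unfold pvKey
  by_cases hx : 2 * PySem.Int.floordiv n (size * size) < size <;>
    by_cases hy : 2 * PySem.Int.mod (PySem.Int.floordiv n size) size < size <;>
      by_cases hz : 2 * PySem.Int.mod n size < size <;>
        simp only [hx, hy, hz, if_true, if_false, decide_true, decide_false] <;>
          cases xi <;> cases yi <;> cases zi <;> decide

theorem pvNodes_filter (size : Int) (xi yi zi : Bool) :
    pvNodesA size xi yi zi = (PySem.List.pyRange 0 (size ^ 3) 1).filter (fun n =>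
      pvKey size n == ((if xi then "front" else "back") ++ "_" ++ (if yi then "left" else "right")
        ++ "_" ++ (if zi then "bottom" else "top"))) := by
  unfold pvNodesA
  rw [PySem.List.foldl_append_if_eq_filter, List.nil_append]
  apply List.filter_congr
  intro n _
  exact (pvKey_eq_cond size n xi yi zi).symm

theorem pvA_eval (size : Int) : build_octant_regions size =
    [("front_left_bottom", pvNodesA size true true true),
     ("front_left_top", pvNodesA size true true false),
     ("front_right_bottom", pvNodesA size true false true),
     ("front_right_top", pvNodesA size true false false),
     ("back_left_bottom", pvNodesA size false true true),
     ("back_left_top", pvNodesA size false true false),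
     ("back_right_bottom", pvNodesA size false false true),
     ("back_right_top", pvNodesA size false false false)] := rfl

theorem pvB_eval (size : Int) : build_octant_regions_alt size =
    pvInit.items.map (fun p => (p.1, p.2 ++ (PySem.List.pyRange 0 (size ^ 3) 1).filter
      (fun n => pvKey size n == p.1))) := by
  have hnd : pvInit.keys.Nodup := by decide
  have hmem : ∀ n ∈ PySem.List.pyRange 0 (size ^ 3) 1, pvInit.contains (pvKey size n) = true := by
    intro n _
    rw [PySem.Dict.contains_iff_mem_keys,
      show pvInit.keys = ["front_left_bottom", "front_left_top", "front_right_bottom",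
        "front_right_top", "back_left_bottom", "back_left_top", "back_right_bottom",
        "back_right_top"] from by decide]
    exact pvKey_mem size n
  exact pvItems_foldl_modify (pvKey size) _ pvInit hnd hmem

-- ===== VERDICT (by name: the statement is the Claim_ definition above) =====
theorem build_octant_regions_spec : Claim_equal_build_octant_regions := by
  intro size _
  show build_octant_regions size = build_octant_regions_alt size
  rw [pvA_eval, pvB_eval,
    show pvInit.items = [("front_left_bottom", []), ("front_left_top", []),
      ("front_right_bottom", []), ("front_right_top", []), ("back_left_bottom", []),
      ("back_left_top", []), ("back_right_bottom", []), ("back_right_top", [])] from by decide]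
  simp only [List.map_cons, List.map_nil, List.nil_append]
  have e1 : pvNodesA size true true true = (PySem.List.pyRange 0 (size ^ 3) 1).filter
      (fun n => pvKey size n == "front_left_bottom") := pvNodes_filter size true true true
  have e2 : pvNodesA size true true false = (PySem.List.pyRange 0 (size ^ 3) 1).filter
      (fun n => pvKey size n == "front_left_top") := pvNodes_filter size true true false
  have e3 : pvNodesA size true false true = (PySem.List.pyRange 0 (size ^ 3) 1).filter
      (fun n => pvKey size n == "front_right_bottom") := pvNodes_filter size true false true
  have e4 : pvNodesA size true false false = (PySem.List.pyRange 0 (size ^ 3) 1).filter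
      (fun n => pvKey size n == "front_right_top") := pvNodes_filter size true false false
  have e5 : pvNodesA size false true true = (PySem.List.pyRange 0 (size ^ 3) 1).filter
      (fun n => pvKey size n == "back_left_bottom") := pvNodes_filter size false true true
  have e6 : pvNodesA size false true false = (PySem.List.pyRange 0 (size ^ 3) 1).filter
      (fun n => pvKey size n == "back_left_top") := pvNodes_filter size false true false
  have e7 : pvNodesA size false false true = (PySem.List.pyRange 0 (size ^ 3) 1).filter
      (fun n => pvKey size n == "back_right_bottom") := pvNodes_filter size false false true
  have e8 : pvNodesA size false false false = (PySem.List.pyRange 0 (size ^ 3) 1).filter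
      (fun n => pvKey size n == "back_right_top") := pvNodes_filter size false false false
  rw [e1, e2, e3, e4, e5, e6, e7, e8]
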